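-- pv_equiv track=rewrite | github.com/cintiasilva-blc/ciencia_da_computacao | Segundo Semestre/ESTRUTURAS DE DADOS /RevisaoFA/Recursividade/exercicios.py | verifica_lista_bin
-- ===== SOURCE A (Python) =====
-- def verifica_lista_bin(lista: list[int]) -> bool:
--     '''Recebe uma lista de numeros e verifica de todos os elementos sao 0 ou 1
--
--     Exemplos:
--     >>> verifica_lista_bin([0])
--     True
--     >>> verifica_lista_bin([1, 0, 1, 0])
--     True
--     >>> verifica_lista_bin([1, 2, 3, 4])
--     False
--     >>> verifica_lista_bin([2, 1, 0])
--     False'''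
--
--     if len(lista) == 0:
--         return True
--     elif len(lista) == 1:
--         if lista[0] == 1 or lista[0] == 0:
--             return True
--         else:
--             return False
--     else:
--         if lista[0] == 0 or lista[0] == 1:
--             return verifica_lista_bin(lista[1:])
--         else:
--             return False
-- ===== SOURCE B (Python) =====
-- def verifica_lista_bin(lista: list[int]) -> bool:
--     for x in lista:
--         if x != 0 and x != 1:
--             return False
--     return True
-- ===== Notes on version B (the rewrite author's own statement) =====
-- stated objective: simpler
-- what changed: Replaced the multi-case recursion with slice copies by a plain iterative for-loop with an early return on the first non-binary element.
import Mathlib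
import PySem

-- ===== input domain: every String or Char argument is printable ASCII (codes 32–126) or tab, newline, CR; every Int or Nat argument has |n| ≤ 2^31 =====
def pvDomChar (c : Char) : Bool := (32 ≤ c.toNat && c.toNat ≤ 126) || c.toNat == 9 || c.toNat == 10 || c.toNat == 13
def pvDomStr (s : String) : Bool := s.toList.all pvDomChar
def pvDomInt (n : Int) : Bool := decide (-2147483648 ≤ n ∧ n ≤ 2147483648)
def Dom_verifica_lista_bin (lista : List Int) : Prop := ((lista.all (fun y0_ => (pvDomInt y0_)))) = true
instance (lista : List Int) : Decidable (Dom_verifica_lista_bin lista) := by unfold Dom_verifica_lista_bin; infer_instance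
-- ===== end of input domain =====

-- B replaces the slice-copying recursion by a single iterative scan with early exit (simpler).

-- ===== PORT A =====
-- literal transliteration of A's recursion: cases on len 0 / 1 / else, tail via lista[1:]
def verifica_lista_bin (lista : List Int) : Bool :=
  if lista.length = 0 then
    true
  else if lista.length = 1 then
    if PySem.List.pyGetD lista 0 0 = 1 ∨ PySem.List.pyGetD lista 0 0 = 0 then true else false
  else
    if PySem.List.pyGetD lista 0 0 = 0 ∨ PySem.List.pyGetD lista 0 0 = 1 then
      verifica_lista_bin (PySem.List.slice lista (some 1) none)
    else
      false
termination_by lista.length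
decreasing_by
  simp [PySem.List.slice_from_one]
  omega

-- ===== PORT B =====
-- the for-loop with early return, as structural recursion over the list
def verifica_lista_bin_alt (lista : List Int) : Bool :=
  match lista with
  | [] => true
  | x :: rest => if x ≠ 0 ∧ x ≠ 1 then false else verifica_lista_bin_alt rest

-- ===== PRECONDITION & SPEC =====
def Spec_verifica_lista_bin (lista : List Int) (out : Bool) : Prop := out = verifica_lista_bin_alt lista
instance (lista : List Int) (out : Bool) : Decidable (Spec_verifica_lista_bin lista out) := by unfold Spec_verifica_lista_bin; infer_instance

-- ===== CLAIM (what is proved, stated in full; the proofs are below) =====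
def Claim_equal_verifica_lista_bin : Prop := ∀ (lista : List Int), Dom_verifica_lista_bin lista → Spec_verifica_lista_bin lista (verifica_lista_bin lista)

-- ===== LEMMAS AND PROOFS =====
theorem verifica_lista_bin_eq_alt (lista : List Int) :
    verifica_lista_bin lista = verifica_lista_bin_alt lista := by
  match lista with
  | [] => simp [verifica_lista_bin, verifica_lista_bin_alt]
  | [x] =>
    simp [verifica_lista_bin, verifica_lista_bin_alt, PySem.List.pyGetD, PySem.List.pyGet?,
      PySem.List.pyIdx?]
    by_cases h0 : x = 0 <;> by_cases h1 : x = 1 <;> simp [h0, h1]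
  | x :: y :: rest =>
    have ih := verifica_lista_bin_eq_alt (y :: rest)
    rw [verifica_lista_bin]
    simp only [PySem.List.pyGetD_zero_cons, PySem.List.slice_from_one, List.tail_cons,
      List.length_cons, ih]
    by_cases h0 : x = 0 <;> by_cases h1 : x = 1 <;>
      simp [h0, h1, verifica_lista_bin_alt]

-- ===== VERDICT (by name: the statement is the Claim_ definition above) =====
theorem verifica_lista_bin_spec : Claim_equal_verifica_lista_bin := by
  intro lista _
  exact verifica_lista_bin_eq_alt lista
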